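-- pv_equiv track=rewrite | github.com/laboratoiresonore/ComfyUI-Spellcaster | spellcaster_core/preflight.py | format_missing_files_hint
-- ===== SOURCE A (Python) =====
-- def format_missing_files_hint(missing_files):
--     """Human-readable explanation for a `missing_files` list.
--     Groups by the kind of file (checkpoint / LoRA / ControlNet / …)
--     and suggests where to find each one."""
--     if not missing_files:
--         return ""
--     by_kind: dict[str, list[str]] = {}
--     KIND_HINTS = {
--         "ckpt_name": ("Checkpoint",
--                        "ComfyUI/models/checkpoints/"),
--         "lora_name": ("LoRA",
--                        "ComfyUI/models/loras/"),
--         "control_net_name": ("ControlNet",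
--                               "ComfyUI/models/controlnet/"),
--         "model_name": ("Upscaler",
--                         "ComfyUI/models/upscale_models/"),
--         "vae_name": ("VAE",
--                       "ComfyUI/models/vae/"),
--         "clip_name": ("CLIP / text encoder",
--                        "ComfyUI/models/clip/"),
--         "clip_name1": ("CLIP / text encoder",
--                         "ComfyUI/models/clip/"),
--         "clip_name2": ("CLIP / text encoder",
--                         "ComfyUI/models/clip/"),
--         "unet_name": ("UNET / diffusion model",
--                        "ComfyUI/models/unet/"),
--         "model": ("Model",
--                    "ComfyUI/models/"),
--         "model_path": ("Model",
--                         "ComfyUI/models/"),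
--     }
--     for ct, inp_name, val in missing_files:
--         label, _path = KIND_HINTS.get(inp_name, ("Model", "ComfyUI/models/"))
--         by_kind.setdefault(label, []).append(val)
--     lines = []
--     for kind, files in by_kind.items():
--         _label_path = next((v[1] for k, v in KIND_HINTS.items()
--                              if v[0] == kind), "ComfyUI/models/")
--         lines.append(f"Missing {kind} files (drop them into {_label_path}):")
--         for f in files:
--             lines.append(f"  • {f}")
--     return "\n".join(lines)
-- ===== SOURCE B (Python) =====
-- def format_missing_files_hint(missing_files):
--     """Human-readable explanation for a `missing_files` list (grouped by kind)."""
--     if not missing_files: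
--         return ""
--     KIND_HINTS = {
--         "ckpt_name": ("Checkpoint", "ComfyUI/models/checkpoints/"),
--         "lora_name": ("LoRA", "ComfyUI/models/loras/"),
--         "control_net_name": ("ControlNet", "ComfyUI/models/controlnet/"),
--         "model_name": ("Upscaler", "ComfyUI/models/upscale_models/"),
--         "vae_name": ("VAE", "ComfyUI/models/vae/"),
--         "clip_name": ("CLIP / text encoder", "ComfyUI/models/clip/"),
--         "clip_name1": ("CLIP / text encoder", "ComfyUI/models/clip/"),
--         "clip_name2": ("CLIP / text encoder", "ComfyUI/models/clip/"),
--         "unet_name": ("UNET / diffusion model", "ComfyUI/models/unet/"),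
--         "model": ("Model", "ComfyUI/models/"),
--         "model_path": ("Model", "ComfyUI/models/"),
--     }
--     # Tag each entry with its (label, path) once, then group by recursive
--     # partition: peel off the first label, collect its files by a filter,
--     # and recurse on what is left.  No dict is built at all.
--     tagged = [KIND_HINTS.get(inp_name, ("Model", "ComfyUI/models/")) + (val,)
--               for _ct, inp_name, val in missing_files]
--
--     def emit(items):
--         if not items:
--             return []
--         label, path, _v = items[0]
--         lines = [f"Missing {label} files (drop them into {path}):"]
--         lines += [f"  • {v}" for l, _p, v in items if l == label]
--         return lines + emit([t for t in items[1:] if t[0] != label])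
--
--     return "\n".join(emit(tagged))
-- ===== Notes on version B (the rewrite author's own statement) =====
-- stated objective: alternative
-- what changed: B builds no dict at all: it tags each entry with its (label, path) once and then groups by recursive partition -- peel off the first label, collect its files with a filter, recurse on the remaining entries -- instead of A's dict-of-lists accumulation plus a per-group next()-rescan of KIND_HINTS for the path.
import Mathlib
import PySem

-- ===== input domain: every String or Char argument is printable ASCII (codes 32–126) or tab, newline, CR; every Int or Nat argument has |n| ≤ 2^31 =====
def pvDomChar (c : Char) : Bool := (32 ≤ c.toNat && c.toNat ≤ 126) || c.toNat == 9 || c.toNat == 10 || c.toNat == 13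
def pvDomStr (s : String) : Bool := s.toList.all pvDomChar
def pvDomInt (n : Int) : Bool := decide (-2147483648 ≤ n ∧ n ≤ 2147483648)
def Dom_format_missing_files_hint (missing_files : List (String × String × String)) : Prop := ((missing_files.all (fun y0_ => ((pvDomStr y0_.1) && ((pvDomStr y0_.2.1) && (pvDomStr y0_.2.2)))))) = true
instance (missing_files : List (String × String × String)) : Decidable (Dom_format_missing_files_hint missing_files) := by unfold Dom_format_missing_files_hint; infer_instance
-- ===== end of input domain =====

-- B groups by recursive partition over the tagged entries (peel the first label, collect its
-- files by a filter, recurse on the rest) instead of A's dict-of-lists plus per-group rescan.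

-- The KIND_HINTS dict literal shared by both ports (module-level data, same entries and order as the Python).
def pvKindHints : PySem.Dict String (String × String) := PySem.Dict.ofList
  [("ckpt_name", ("Checkpoint", "ComfyUI/models/checkpoints/")),
   ("lora_name", ("LoRA", "ComfyUI/models/loras/")),
   ("control_net_name", ("ControlNet", "ComfyUI/models/controlnet/")),
   ("model_name", ("Upscaler", "ComfyUI/models/upscale_models/")),
   ("vae_name", ("VAE", "ComfyUI/models/vae/")),
   ("clip_name", ("CLIP / text encoder", "ComfyUI/models/clip/")),
   ("clip_name1", ("CLIP / text encoder", "ComfyUI/models/clip/")),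
   ("clip_name2", ("CLIP / text encoder", "ComfyUI/models/clip/")),
   ("unet_name", ("UNET / diffusion model", "ComfyUI/models/unet/")),
   ("model", ("Model", "ComfyUI/models/")),
   ("model_path", ("Model", "ComfyUI/models/"))]

-- ===== PORT A =====
def format_missing_files_hint (missing_files : List (String × String × String)) : String :=
  if missing_files = [] then "" else
    let by_kind : PySem.Dict String (List String) :=
      missing_files.foldl (fun d t =>
        let lp := pvKindHints.getD t.2.1 ("Model", "ComfyUI/models/")
        d.modify lp.1 ([] : List String) (fun l => l ++ [t.2.2])) PySem.Dict.empty
    let lines : List String :=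
      by_kind.items.foldl (fun acc kv =>
        let path := (pvKindHints.items.findSome? (fun p =>
            if p.2.1 == kv.1 then some p.2.2 else none)).getD "ComfyUI/models/"
        kv.2.foldl (fun acc2 f => acc2 ++ ["  • " ++ f])
          (acc ++ ["Missing " ++ kv.1 ++ " files (drop them into " ++ path ++ "):"])) []
    String.intercalate "\n" lines

-- ===== PORT B =====
-- B's recursive grouping: emit the first entry's label group (its files collected by a
-- filter over all items), then recurse on the items whose label differs.
def pvEmit : List (String × String × String) → List String
  | [] => []
  | t :: rest =>
    ((("Missing " ++ t.1 ++ " files (drop them into " ++ t.2.1 ++ "):")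
        :: ((t :: rest).filter (fun u => u.1 == t.1)).map (fun u => "  • " ++ u.2.2))
      ++ pvEmit (rest.filter (fun u => u.1 != t.1)))
termination_by l => l.length
decreasing_by
  simp only [List.length_cons, List.length_unattach]
  exact Nat.lt_succ_of_le (le_trans (List.length_filter_le _ _) (by simp))

def format_missing_files_hint_alt (missing_files : List (String × String × String)) : String :=
  if missing_files = [] then "" else
    let tagged : List (String × String × String) :=
      missing_files.map (fun t =>
        let lp := pvKindHints.getD t.2.1 ("Model", "ComfyUI/models/")
        (lp.1, lp.2, t.2.2))
    String.intercalate "\n" (pvEmit tagged)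

-- ===== PRECONDITION & SPEC =====
def Spec_format_missing_files_hint (missing_files : List (String × String × String)) (out : String) : Prop := out = format_missing_files_hint_alt missing_files
instance (missing_files : List (String × String × String)) (out : String) : Decidable (Spec_format_missing_files_hint missing_files out) := by unfold Spec_format_missing_files_hint; infer_instance

-- ===== CLAIM =====
def Claim_equal_format_missing_files_hint : Prop := ∀ (missing_files : List (String × String × String)), Dom_format_missing_files_hint missing_files → Spec_format_missing_files_hint missing_files (format_missing_files_hint missing_files)

-- ===== LEMMAS AND PROOFS =====

-- A's inner next()-scan for a label's path, as a function.
def pvScan (kind : String) : String :=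
  (pvKindHints.items.findSome? (fun p =>
      if p.2.1 == kind then some p.2.2 else none)).getD "ComfyUI/models/"

-- What A emits for one group, given the tagged list and the group's label.
def pvF (l : List (String × String × String)) (k : String) : List String :=
  ("Missing " ++ k ++ " files (drop them into " ++ pvScan k ++ "):")
    :: (l.filter (fun u => u.1 == k)).map (fun u => "  • " ++ u.2.2)

-- KIND_HINTS is label/path-consistent: the path a `get` returns with a label is
-- the path A's by-label scan finds for that label.
set_option maxHeartbeats 1600000 in
theorem pvScan_getD (inp : String) :
    pvScan (pvKindHints.getD inp ("Model", "ComfyUI/models/")).1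
      = (pvKindHints.getD inp ("Model", "ComfyUI/models/")).2 := by
  rw [PySem.Dict.getD_eq_get?_getD]
  rw [show pvKindHints = PySem.Dict.mk
    [("ckpt_name", ("Checkpoint", "ComfyUI/models/checkpoints/")),
     ("lora_name", ("LoRA", "ComfyUI/models/loras/")),
     ("control_net_name", ("ControlNet", "ComfyUI/models/controlnet/")),
     ("model_name", ("Upscaler", "ComfyUI/models/upscale_models/")),
     ("vae_name", ("VAE", "ComfyUI/models/vae/")),
     ("clip_name", ("CLIP / text encoder", "ComfyUI/models/clip/")),
     ("clip_name1", ("CLIP / text encoder", "ComfyUI/models/clip/")),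
     ("clip_name2", ("CLIP / text encoder", "ComfyUI/models/clip/")),
     ("unet_name", ("UNET / diffusion model", "ComfyUI/models/unet/")),
     ("model", ("Model", "ComfyUI/models/")),
     ("model_path", ("Model", "ComfyUI/models/"))] from rfl]
  simp only [PySem.Dict.get?_mk_cons]
  split_ifs <;>
    first
      | decide
      | (rw [show ({ items := [] } : PySem.Dict String (String × String)).get? inp = none from rfl]
         decide)

-- set(xs) commutes with filtering.
theorem pvOfList_filter (p : String → Bool) (xs : List String) :
    PySem.Set.ofList (xs.filter p) = (PySem.Set.ofList xs).filter p := by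
  induction xs with
  | nil => rfl
  | cons y ys ih =>
    by_cases hy : p y = true
    · rw [List.filter_cons_of_pos hy, PySem.Set.ofList_cons, PySem.Set.ofList_cons, ih]
      show _ :: _ = List.filter p (y :: _)
      rw [List.filter_cons_of_pos hy]
      refine congrArg _ ?_
      show List.filter _ (List.filter p _) = List.filter p (List.filter _ _)
      rw [List.filter_filter, List.filter_filter]
      exact List.filter_congr (fun x _ => Bool.and_comm _ _)
    · have hpy : p y = false := by revert hy; cases (p y) <;> simp
      rw [List.filter_cons_of_neg (by simp [hpy]), PySem.Set.ofList_cons, ih]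
      show _ = List.filter p (y :: _)
      rw [List.filter_cons_of_neg (by simp [hpy])]
      show _ = List.filter p (List.filter _ _)
      rw [List.filter_filter]
      refine List.filter_congr ?_
      intro a _
      by_cases hay : (a == y) = true
      · rw [eq_of_beq hay, hpy]; rfl
      · simp [hay]

theorem pvFlatMap_congr {α β : Type} (l : List α) (f g : α → List β)
    (h : ∀ x ∈ l, f x = g x) : l.flatMap f = l.flatMap g := by
  induction l with
  | nil => rfl
  | cons x xs ih =>
    rw [List.flatMap_cons, List.flatMap_cons, h x (by simp), ih (fun y hy => h y (by simp [hy]))]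

-- Main: iterating A's groups (distinct labels in first-occurrence order, files by filter)
-- produces exactly B's recursive partition, provided each entry's stored path is the one
-- A's scan finds for its label.
theorem pvMainAux : ∀ (n : Nat) (l : List (String × String × String)), l.length ≤ n →
    (∀ u ∈ l, pvScan u.1 = u.2.1) →
    (PySem.Set.ofList (l.map (fun u => u.1))).flatMap (pvF l) = pvEmit l := by
  intro n
  induction n with
  | zero =>
    intro l hl _
    cases l with
    | nil => rw [pvEmit]; rfl
    | cons t rest => simp at hl
  | succ n ihn =>
    intro l hl h
    cases l with
    | nil => rw [pvEmit]; rfl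
    | cons t rest =>
      rw [List.map_cons, PySem.Set.ofList_cons]
      show List.flatMap _ (t.1 :: _) = _
      rw [List.flatMap_cons, pvEmit]
      have hhead : pvF (t :: rest) t.1
          = ("Missing " ++ t.1 ++ " files (drop them into " ++ t.2.1 ++ "):")
              :: ((t :: rest).filter (fun u => u.1 == t.1)).map (fun u => "  • " ++ u.2.2) := by
        unfold pvF
        rw [h t (by simp)]
      rw [hhead]
      refine congrArg _ ?_
      -- the remaining labels are the labels of the entries whose label differs from t.1
      have hset : PySem.Set.discard (PySem.Set.ofList (rest.map (fun u => u.1))) t.1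
          = PySem.Set.ofList ((rest.filter (fun u => u.1 != t.1)).map (fun u => u.1)) := by
        show List.filter _ _ = _
        rw [← pvOfList_filter, List.filter_map]
        rfl
      rw [hset]
      have hcongr : ∀ k ∈ PySem.Set.ofList ((rest.filter (fun u => u.1 != t.1)).map (fun u => u.1)),
          pvF (t :: rest) k = pvF (rest.filter (fun u => u.1 != t.1)) k := by
        intro k hk
        rw [PySem.Set.mem_ofList] at hk
        obtain ⟨u, hu, hul⟩ := List.mem_map.mp hk
        have huf := List.of_mem_filter hu
        have hkt : k ≠ t.1 := by
          rw [← hul]; simpa using huf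
        unfold pvF
        refine congrArg _ (congrArg _ ?_)
        rw [List.filter_cons_of_neg (by simpa using Ne.symm hkt), List.filter_filter]
        refine (List.filter_congr ?_).symm
        intro x _
        by_cases hx : (x.1 == k) = true
        · have hxt : x.1 ≠ t.1 := by
            rw [eq_of_beq hx]; exact hkt
          simp [hx, hxt]
        · simp [hx]
      rw [pvFlatMap_congr _ _ _ hcongr]
      refine ihn _ ?_ ?_
      · exact le_trans (List.length_filter_le _ _) (by simpa using Nat.le_of_succ_le_succ hl)
      · exact fun u hu => h u (List.mem_cons_of_mem _ (List.mem_of_mem_filter hu))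

theorem pvMain (l : List (String × String × String))
    (h : ∀ u ∈ l, pvScan u.1 = u.2.1) :
    (PySem.Set.ofList (l.map (fun u => u.1))).flatMap (pvF l) = pvEmit l :=
  pvMainAux l.length l (Nat.le_refl _) h

-- A's inner bullet loop appends the mapped bullets.
theorem pvInner (l : List String) (acc : List String) :
    l.foldl (fun a f => a ++ ["  • " ++ f]) acc = acc ++ l.map (fun f => "  • " ++ f) := by
  induction l generalizing acc with
  | nil => simp
  | cons x xs ih => simp [ih]

-- A's outer line loop is a flatMap over the dict items.
theorem pvLinesA (items : List (String × List String)) (acc : List String) :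
    items.foldl (fun acc kv =>
        let path := (pvKindHints.items.findSome? (fun p =>
            if p.2.1 == kv.1 then some p.2.2 else none)).getD "ComfyUI/models/"
        kv.2.foldl (fun acc2 f => acc2 ++ ["  • " ++ f])
          (acc ++ ["Missing " ++ kv.1 ++ " files (drop them into " ++ path ++ "):"])) acc
    = acc ++ items.flatMap (fun kv =>
        ("Missing " ++ kv.1 ++ " files (drop them into " ++ pvScan kv.1 ++ "):")
          :: kv.2.map (fun f => "  • " ++ f)) := by
  induction items generalizing acc with
  | nil => simp
  | cons kv rest ih =>
    rw [List.foldl_cons, List.flatMap_cons]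
    show List.foldl _ (List.foldl _ _ kv.2) rest = _
    rw [pvInner, ih]
    simp [pvScan]

-- The two ports agree.
theorem format_missing_files_hint_eq (mf : List (String × String × String)) :
    format_missing_files_hint mf = format_missing_files_hint_alt mf := by
  unfold format_missing_files_hint format_missing_files_hint_alt
  by_cases h : mf = []
  · simp [h]
  · simp only [h, if_false]
    refine congrArg _ ?_
    -- names for the tagged list and the dict A builds
    set tagged : List (String × String × String) := mf.map (fun t =>
        let lp := pvKindHints.getD t.2.1 ("Model", "ComfyUI/models/")
        (lp.1, lp.2, t.2.2)) with htagged
    set d : PySem.Dict String (List String) := mf.foldl (fun d t =>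
        let lp := pvKindHints.getD t.2.1 ("Model", "ComfyUI/models/")
        d.modify lp.1 ([] : List String) (fun l => l ++ [t.2.2])) PySem.Dict.empty with hd
    -- the dict's keys: the distinct labels in first-occurrence order
    have hkeys : d.keys = PySem.Set.ofList (tagged.map (fun u => u.1)) := by
      have := PySem.Dict.keys_foldl_modify_key (l := mf)
        (key := fun t => (pvKindHints.getD t.2.1 ("Model", "ComfyUI/models/")).1)
        (d0 := ([] : List String))
        (f := fun _ t => fun l => l ++ [t.2.2]) (d := PySem.Dict.empty)
      rw [PySem.Dict.keys_empty, PySem.Set.update_nil_left] at this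
      rw [htagged, List.map_map]
      exact this
    have hnodup : d.keys.Nodup := by
      have := PySem.Dict.nodup_keys_foldl_modify_key (l := mf)
        (key := fun t => (pvKindHints.getD t.2.1 ("Model", "ComfyUI/models/")).1)
        (d0 := ([] : List String))
        (f := fun _ t => fun l => l ++ [t.2.2]) (d := PySem.Dict.empty)
        (by rw [PySem.Dict.keys_empty]; exact List.nodup_nil)
      exact this
    -- the dict's values: the files of each label, in order
    have hget : ∀ k, d.getD k [] = ((tagged.filter (fun u => u.1 == k)).map (fun u => u.2.2)) := by
      intro k
      have := PySem.Dict.getD_foldl_modify_append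
        (l := mf.map (fun t => ((pvKindHints.getD t.2.1 ("Model", "ComfyUI/models/")).1, t.2.2)))
        (d := PySem.Dict.empty) (c := k)
      rw [List.foldl_map, PySem.Dict.getD_empty, List.nil_append, List.filter_map,
        List.map_map] at this
      rw [htagged, List.filter_map, List.map_map]
      exact this
    have hitems : d.items = d.keys.map (fun k => (k, d.getD k [])) :=
      PySem.Dict.items_eq_map_keys d hnodup []
    rw [pvLinesA, List.nil_append, hitems, List.flatMap_map, hkeys]
    have : ∀ k ∈ PySem.Set.ofList (tagged.map (fun u => u.1)),
        ("Missing " ++ k ++ " files (drop them into " ++ pvScan k ++ "):")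
            :: (d.getD k []).map (fun f => "  • " ++ f) = pvF tagged k := by
      intro k _
      rw [hget k]
      unfold pvF
      rw [List.map_map]
      rfl
    rw [pvFlatMap_congr _ _ _ this]
    refine pvMain tagged ?_
    intro u hu
    rw [htagged] at hu
    obtain ⟨t, _, rfl⟩ := List.mem_map.mp hu
    exact pvScan_getD t.2.1

-- ===== VERDICT =====
theorem format_missing_files_hint_spec : Claim_equal_format_missing_files_hint := by
  intro mf _
  unfold Spec_format_missing_files_hint
  exact format_missing_files_hint_eq mf
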